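-- pv_equiv track=rewrite | github.com/Jeeyeonn/Algorithm | 프로그래머스/과일장수_230126.py | solution
-- ===== SOURCE A (Python) =====
-- def solution(k, m, score):
--     answer = 0
--     score.sort(reverse=True)
--
--     cnt = 0
--     for i in score:
--         if cnt < m:
--             cnt += 1
--         if cnt == m:
--             answer += m * i
--             cnt = 0
--     return answer
-- ===== SOURCE B (Python) =====
-- def solution(k, m, score):
--     # sort in place (same observable mutation as the original)
--     score.sort(reverse=True)
--     # each full group of m ends at indices m-1, 2m-1, ...; its minimum is the
--     # element at the group-closing index, so the box is worth m * score[j]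
--     return sum(m * score[j] for j in range(m - 1, len(score), m))
-- ===== Notes on version B (the rewrite author's own statement) =====
-- stated objective: simpler
-- what changed: Instead of scanning every element with a running group counter, B sums m*score[j] only at the group-closing indices m-1, 2m-1, ... of the descending-sorted list (one sum over a strided range, no counter state); sorting dominates, so it is not measurably faster.
-- outside the precondition, e.g. on solution(0, 0, [1, 2]): A returns 0, B raises ValueError
import Mathlib
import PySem

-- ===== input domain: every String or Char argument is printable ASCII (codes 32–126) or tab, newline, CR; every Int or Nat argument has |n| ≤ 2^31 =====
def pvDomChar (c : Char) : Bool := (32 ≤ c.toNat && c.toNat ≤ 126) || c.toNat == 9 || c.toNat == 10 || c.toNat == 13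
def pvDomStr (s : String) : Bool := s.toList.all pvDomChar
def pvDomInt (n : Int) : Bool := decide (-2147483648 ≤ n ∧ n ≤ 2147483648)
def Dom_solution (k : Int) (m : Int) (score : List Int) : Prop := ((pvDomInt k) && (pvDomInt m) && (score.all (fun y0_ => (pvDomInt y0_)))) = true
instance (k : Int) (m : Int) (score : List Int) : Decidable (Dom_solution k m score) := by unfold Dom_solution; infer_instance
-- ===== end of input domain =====

-- B sums m*score[j] only at the group-closing indices m-1, 2m-1, … of the
-- descending-sorted list instead of counting every element with a running
-- counter (simpler: one strided sum, no loop state).  Both programs sort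
-- `score` in place; the equivalence proved here is about the return value.

-- ===== PORT A =====
-- for i in score: if cnt < m: cnt += 1; if cnt == m: answer += m*i; cnt = 0
def solution (k : Int) (m : Int) (score : List Int) : Int :=
  let s := PySem.List.sorted score (fun x => x) true
  (s.foldl (fun (p : Int × Int) i =>
      let cnt := if p.2 < m then p.2 + 1 else p.2
      if cnt = m then (p.1 + m * i, 0) else (p.1, cnt)) (0, 0)).1

-- ===== PORT B =====
-- sum(m * score[j] for j in range(m - 1, len(score), m))
def solution_alt (k : Int) (m : Int) (score : List Int) : Int :=
  let s := PySem.List.sorted score (fun x => x) true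
  ((PySem.List.pyRange (m - 1) (s.length : Int) m).map
      (fun j => m * PySem.List.pyGetD s j 0)).sum

-- ===== PRECONDITION & SPEC =====
-- Pre_ excludes m = 0, where B's range(m-1, len, m) raises ValueError (step 0)
-- while A returns 0; everywhere else (including m < 0) both return.
def Pre_solution (k : Int) (m : Int) (score : List Int) : Prop := m ≠ 0
instance (k : Int) (m : Int) (score : List Int) : Decidable (Pre_solution k m score) := by unfold Pre_solution; infer_instance

def pvWitness_solution : Int × Int × List Int := (4, 3, [4, 1, 2, 2, 4, 4])

def Spec_solution (k : Int) (m : Int) (score : List Int) (out : Int) : Prop := out = solution_alt k m score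
instance (k : Int) (m : Int) (score : List Int) (out : Int) : Decidable (Spec_solution k m score out) := by unfold Spec_solution; infer_instance

-- ===== CLAIM (what is proved, stated in full; the proofs are below) =====
def Claim_equal_solution : Prop := ∀ (k : Int) (m : Int) (score : List Int), Dom_solution k m score → Pre_solution k m score → Spec_solution k m score (solution k m score)

-- ===== LEMMAS AND PROOFS =====

-- A's loop body, abbreviated for the lemmas below
def pvStep (m : Int) (p : Int × Int) (i : Int) : Int × Int :=
  let cnt := if p.2 < m then p.2 + 1 else p.2
  if cnt = m then (p.1 + m * i, 0) else (p.1, cnt)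

-- negative m: A's counter never moves, the answer stays put
theorem pvA_neg (m : Int) (hm : m < 0) (s : List Int) (a : Int) :
    s.foldl (pvStep m) (a, 0) = (a, 0) := by
  induction s generalizing a with
  | nil => rfl
  | cons i t ih =>
      have h1 : ¬ ((0 : Int) < m) := by omega
      have h2 : (0 : Int) ≠ m := by omega
      simp only [List.foldl_cons, pvStep, h1, if_false, h2]
      exact ih a

-- negative m: B's range is empty
theorem pvB_neg (m : Int) (hm : m < 0) (n : Int) (hn : 0 ≤ n) :
    PySem.List.pyRange (m - 1) n m = [] := by
  have h0 : m ≠ 0 := by omega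
  have h1 : ¬ (0 < m) := by omega
  have h2 : ¬ (n < m - 1) := by omega
  simp [PySem.List.pyRange, h0, h1, h2]

-- shifting a positive-step range down by one
theorem pvRange_shift (a b m : Int) (hm : 0 < m) :
    PySem.List.pyRange a b m =
      (PySem.List.pyRange (a - 1) (b - 1) m).map (fun x => x + 1) := by
  rw [PySem.List.pyRange_of_pos _ _ hm, PySem.List.pyRange_of_pos _ _ hm, List.map_map]
  have hc : (if a - 1 < b - 1 then ((b - 1 - (a - 1) + m - 1) / m).toNat else 0)
      = (if a < b then ((b - a + m - 1) / m).toNat else 0) := by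
    by_cases h : a < b
    · simp only [h, if_true, show a - 1 < b - 1 from by omega, if_true]
      ring_nf
    · simp [h, show ¬ (a - 1 < b - 1) from by omega]
  rw [hc]
  apply List.map_congr_left
  intro kk _
  simp only [Function.comp_apply]
  ring

-- peeling the first element of a range starting at 0
theorem pvRange_cons0 (b m : Int) (hm : 0 < m) (hb : 0 < b) :
    PySem.List.pyRange 0 b m = 0 :: PySem.List.pyRange m b m := by
  rw [PySem.List.pyRange_of_pos _ _ hm, PySem.List.pyRange_of_pos _ _ hm]
  have key : ((b - 0 + m - 1) / m).toNat =
      (if m < b then ((b - m + m - 1) / m).toNat else 0) + 1 := by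
    by_cases h : m < b
    · simp only [h, if_true]
      have h1 : b - 0 + m - 1 = (b - m + m - 1) + 1 * m := by ring
      rw [h1, Int.add_mul_ediv_right _ _ (by omega : m ≠ 0)]
      have h2 : 0 ≤ (b - m + m - 1) / m := by
        apply Int.ediv_nonneg <;> omega
      omega
    · simp only [h, if_false]
      have h1 : b - 0 + m - 1 = (b - 1) + 1 * m := by ring
      rw [h1, Int.add_mul_ediv_right _ _ (by omega : m ≠ 0)]
      have h2 : (b - 1) / m = 0 := Int.ediv_eq_zero_of_lt (by omega) (by omega)
      omega
  rw [if_pos hb, key, List.range_succ_eq_map, List.map_cons, List.map_map]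
  congr 1
  · simp
  · apply List.map_congr_left
    intro kk _
    simp only [Function.comp_apply, Nat.succ_eq_add_one]
    push_cast
    ring

-- indexing a cons at a positive index
theorem pvGetD_cons (i : Int) (t : List Int) (j : Int) (hj : 0 ≤ j) :
    PySem.List.pyGetD (i :: t) (j + 1) 0 = PySem.List.pyGetD t j 0 := by
  rw [PySem.List.pyGetD_of_nonneg _ _ (by omega), PySem.List.pyGetD_of_nonneg _ _ hj,
      show (j + 1).toNat = j.toNat + 1 from by omega, List.getD_cons_succ]

-- positive m, main invariant: A's loop from counter c equals B's strided sum
-- starting at index m-1-c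
theorem pvMain (m : Int) (hm : 0 < m) (s : List Int) :
    ∀ (a c : Int), 0 ≤ c → c < m →
    (s.foldl (pvStep m) (a, c)).1 =
      a + ((PySem.List.pyRange (m - 1 - c) (s.length : Int) m).map
        (fun j => m * PySem.List.pyGetD s j 0)).sum := by
  induction s with
  | nil =>
      intro a c hc0 hcm
      have h : ¬ (m - 1 - c < (0 : Int)) := by omega
      simp [PySem.List.pyRange, show m ≠ 0 from by omega, hm, h]
  | cons i t ih =>
      intro a c hc0 hcm
      have hclt : c < m := hcm
      simp only [List.foldl_cons, pvStep, if_pos hclt]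
      by_cases hfull : c + 1 = m
      · -- group closes at this element
        simp only [if_pos hfull]
        rw [ih (a + m * i) 0 le_rfl hm]
        have hstart : m - 1 - c = 0 := by omega
        rw [hstart]
        have hlen : ((i :: t).length : Int) = (t.length : Int) + 1 := by
          simp
        rw [hlen, pvRange_cons0 _ _ hm (by omega)]
        rw [pvRange_shift m ((t.length : Int) + 1) m hm]
        have hshift : (m : Int) - 1 = m - 1 - 0 := by ring
        simp only [List.map_cons, List.sum_cons, List.map_map]
        have hmap : ∀ j ∈ PySem.List.pyRange (m - 1) ((t.length : Int) + 1 - 1) m,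
            ((fun j => m * PySem.List.pyGetD (i :: t) j 0) ∘ fun x => x + 1) j
              = m * PySem.List.pyGetD t j 0 := by
          intro j hj
          have hj' := (PySem.List.mem_pyRange_iff_of_pos hm j).1 hj
          have : 0 ≤ j := by omega
          simp only [Function.comp_apply, pvGetD_cons i t j this]
        rw [List.map_congr_left hmap]
        have hgd : PySem.List.pyGetD (i :: t) 0 0 = i := by
          rw [PySem.List.pyGetD_of_nonneg _ _ le_rfl]; rfl
        rw [hgd]
        have : (t.length : Int) + 1 - 1 = (t.length : Int) := by ring
        rw [this, hshift]
        ring_nf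
      · -- group still open: counter advances to c+1
        simp only [if_neg hfull]
        rw [ih a (c + 1) (by omega) (by omega)]
        have hlen : ((i :: t).length : Int) = (t.length : Int) + 1 := by
          simp
        rw [hlen, pvRange_shift (m - 1 - c) ((t.length : Int) + 1) m hm]
        simp only [List.map_map]
        have hmap : ∀ j ∈ PySem.List.pyRange (m - 1 - c - 1) ((t.length : Int) + 1 - 1) m,
            ((fun j => m * PySem.List.pyGetD (i :: t) j 0) ∘ fun x => x + 1) j
              = m * PySem.List.pyGetD t j 0 := by
          intro j hj
          have hj' := (PySem.List.mem_pyRange_iff_of_pos hm j).1 hj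
          have : 0 ≤ j := by omega
          simp only [Function.comp_apply, pvGetD_cons i t j this]
        rw [List.map_congr_left hmap]
        have h1 : m - 1 - c - 1 = m - 1 - (c + 1) := by ring
        have h2 : (t.length : Int) + 1 - 1 = (t.length : Int) := by ring
        rw [h1, h2]

-- ===== VERDICT (by name: the statement is the Claim_ definition above) =====
theorem solution_spec : Claim_equal_solution := by
  intro k m score _ hpre
  unfold Spec_solution solution solution_alt
  set s := PySem.List.sorted score (fun x => x) true with hs
  by_cases hm : 0 < m
  · have := pvMain m hm s 0 0 le_rfl hm
    simp only [show (fun (p : Int × Int) i =>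
        let cnt := if p.2 < m then p.2 + 1 else p.2
        if cnt = m then (p.1 + m * i, 0) else (p.1, cnt)) = pvStep m from rfl]
    rw [this]
    have : m - 1 - 0 = m - 1 := by ring
    rw [this]
    ring
  · have hneg : m < 0 := by
      rcases lt_trichotomy m 0 with h | h | h
      · exact h
      · exact absurd h hpre
      · exact absurd h hm
    simp only [show (fun (p : Int × Int) i =>
        let cnt := if p.2 < m then p.2 + 1 else p.2
        if cnt = m then (p.1 + m * i, 0) else (p.1, cnt)) = pvStep m from rfl]
    rw [pvA_neg m hneg s 0, pvB_neg m hneg (s.length : Int) (by positivity)]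
    simp
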